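-- pv_equiv track=rewrite | github.com/ElyaPogh/ML_ACA | Homework_5.py | battleship
-- ===== SOURCE A (Python) =====
-- def battleship (board, count, transpose=False):
--     for b in board:
--         size = 0
--         for idx, x in enumerate(b):
--             if x == "X":
--                 size += 1
--                 if size > 1 or transpose:
--                     i = idx
--                     if not transpose:
--                         b[i-1] = "O"
--                     while i<len(b) and b[i] == "X":
--                         b[i] = "O"
--                         i +=1
--                     count += 1
--                     size = 0
--             else:
--                 size = 0
--     return board, count
-- ===== SOURCE B (Python) =====
-- def battleship(board, count, transpose=False):
--     for row in board:
--         # Step 1: find maximal runs of consecutive "X" as (start, length) pairs.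
--         runs = []
--         start = None
--         for i, cell in enumerate(row):
--             if cell == "X":
--                 if start is None:
--                     start = i
--             else:
--                 if start is not None:
--                     runs.append((start, i - start))
--                     start = None
--         if start is not None:
--             runs.append((start, len(row) - start))
--         # Step 2: a run is a counted ship iff transpose, or its length >= 2.
--         for s, length in runs:
--             if transpose or length >= 2:
--                 for j in range(s, s + length):
--                     row[j] = "O"
--                 count += 1
--     return board, count
-- ===== Notes on version B (the rewrite author's own statement) =====
-- stated objective: simpler
-- what changed: Replaces A's stateful size-counter scan with inline marking (and its in-loop rescans of already-marked cells) by a two-phase decomposition per row: first collect the maximal runs of consecutive 'X' as (start, length) pairs, then mark and count exactly the qualifying runs.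
import Mathlib
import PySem

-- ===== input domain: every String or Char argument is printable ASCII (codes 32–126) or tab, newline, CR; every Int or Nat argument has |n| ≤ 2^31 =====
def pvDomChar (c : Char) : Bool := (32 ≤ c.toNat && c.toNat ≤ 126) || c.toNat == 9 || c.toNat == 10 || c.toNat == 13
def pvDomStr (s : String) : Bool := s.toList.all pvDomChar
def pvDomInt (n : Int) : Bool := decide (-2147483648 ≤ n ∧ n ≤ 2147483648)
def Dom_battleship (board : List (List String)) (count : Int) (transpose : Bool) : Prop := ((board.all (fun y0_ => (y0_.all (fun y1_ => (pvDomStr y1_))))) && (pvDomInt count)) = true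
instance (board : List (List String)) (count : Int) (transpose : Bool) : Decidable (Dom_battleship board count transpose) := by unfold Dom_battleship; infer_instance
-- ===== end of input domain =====

-- B replaces A's size-counter scan with a per-row "find runs, then mark qualifying runs" decomposition
-- (objective: simpler). Both Pythons mutate the rows of `board` in place; the theorem is about the return value.

-- ===== PORT A =====
-- Python: while i < len(b) and b[i] == "X": b[i] = "O"; i += 1   (the mutated row; the final i is unused;
-- the first argument is the structural termination bound b.length - i, exact: the guard i < b.length is still checked)
def markFrom : Nat → List String → Nat → List String
  | 0, b, _ => b
  | fuel+1, b, i => if i < b.length && b[i]! == "X" then markFrom fuel (b.set i "O") (i+1) else b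

-- Python: the inner `for idx, x in enumerate(b)` loop of A, over the live (mutated) row
-- (first argument = structural termination bound b.length - idx; the guard idx < b.length is still checked)
def rowLoopA : Nat → List String → Nat → Nat → Int → Bool → List String × Int
  | 0, b, _, _, c, _ => (b, c)
  | fuel+1, b, idx, size, c, t =>
    if idx < b.length then
      if b[idx]! == "X" then
        if size + 1 > 1 || t then
          let b1 := if !t then b.set (idx-1) "O" else b
          let b2 := markFrom (b1.length - idx) b1 idx
          rowLoopA fuel b2 (idx+1) 0 (c+1) t
        else rowLoopA fuel b (idx+1) (size+1) c t
      else rowLoopA fuel b (idx+1) 0 c t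
    else (b, c)

def battleship (board : List (List String)) (count : Int) (transpose : Bool) : List (List String) × Int :=
  let r := board.foldl (fun acc b =>
    let res := rowLoopA (b.length - 0) b 0 0 acc.2 transpose
    (acc.1 ++ [res.1], res.2)) (([] : List (List String)), count)
  (r.1, r.2)

-- ===== PORT B =====
-- Python: step 1 of B — collect the maximal runs of consecutive "X" as (start, length) pairs
def runsAux : List String → Nat → Option Nat → List (Nat × Nat) → List (Nat × Nat)
  | [], n, start, runs =>
    match start with
    | some s => runs ++ [(s, n - s)]
    | none => runs
  | cell :: rest, i, start, runs =>
    if cell == "X" then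
      runsAux rest (i+1) (match start with | none => some i | some s => some s) runs
    else
      match start with
      | some s => runsAux rest (i+1) none (runs ++ [(s, i - s)])
      | none => runsAux rest (i+1) none runs

-- Python: for j in range(s, s + length): row[j] = "O"
-- (first argument = the number of iterations stop - j, structural)
def markRun : Nat → List String → Nat → Nat → List String
  | 0, row, _, _ => row
  | fuel+1, row, j, stop => if j < stop then markRun fuel (row.set j "O") (j+1) stop else row

def battleship_alt (board : List (List String)) (count : Int) (transpose : Bool) : List (List String) × Int :=
  let r := board.foldl (fun acc row =>
    let runs := runsAux row 0 none []
    let rc := runs.foldl (fun (p : List String × Int) run =>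
      if transpose || run.2 ≥ 2 then (markRun run.2 p.1 run.1 (run.1 + run.2), p.2 + 1) else p)
      (row, acc.2)
    (acc.1 ++ [rc.1], rc.2)) (([] : List (List String)), count)
  (r.1, r.2)

-- ===== PRECONDITION & SPEC =====
def Spec_battleship (board : List (List String)) (count : Int) (transpose : Bool) (out : List (List String) × Int) : Prop := out = battleship_alt board count transpose
instance (board : List (List String)) (count : Int) (transpose : Bool) (out : List (List String) × Int) : Decidable (Spec_battleship board count transpose out) := by unfold Spec_battleship; infer_instance

-- ===== CLAIM (what is proved, stated in full; the proofs are below) =====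
def Claim_equal_battleship : Prop := ∀ (board : List (List String)) (count : Int) (transpose : Bool), Dom_battleship board count transpose → Spec_battleship board count transpose (battleship board count transpose)

-- ===== LEMMAS AND PROOFS =====

-- fuel-saturated views of the three loops: the fuel argument is exactly the loop's remaining-iteration bound
def markFromC (b : List String) (i : Nat) : List String := markFrom (b.length - i) b i
def markRunC (row : List String) (j stop : Nat) : List String := markRun (stop - j) row j stop
def rowLoopAC (b : List String) (idx size : Nat) (c : Int) (t : Bool) : List String × Int :=
  rowLoopA (b.length - idx) b idx size c t

-- the inner fold step of battleship_alt, named for the proofs (definitionally equal to the lambda)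
def stepB (t : Bool) (p : List String × Int) (run : Nat × Nat) : List String × Int :=
  if t || run.2 ≥ 2 then (markRun run.2 p.1 run.1 (run.1 + run.2), p.2 + 1) else p

-- length of the leading block of "X"
def xrun : List String → Nat
  | [] => 0
  | c :: r => if c == "X" then xrun r + 1 else 0

theorem xrun_le (l : List String) : xrun l ≤ l.length := by
  induction l with
  | nil => simp [xrun]
  | cons c r ih => simp only [xrun]; split <;> simp <;> omega

theorem set_getElem!_self (l : List String) (i : Nat) (a : String) (h : i < l.length) : (l.set i a)[i]! = a := by
  rw [getElem!_pos (l.set i a) i (by simpa using h)]; simp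

theorem set_getElem!_ne (l : List String) (i m : Nat) (a : String) (h : i ≠ m) : (l.set i a)[m]! = l[m]! := by
  by_cases hm : m < l.length
  · rw [getElem!_pos (l.set i a) m (by simpa using hm), getElem!_pos l m hm]
    simp [h]
  · rw [getElem!_neg (l.set i a) m (by simpa using hm), getElem!_neg l m hm]

theorem runsAux_acc (l : List String) : ∀ (i : Nat) (st : Option Nat) (rs : List (Nat × Nat)),
    runsAux l i st rs = rs ++ runsAux l i st [] := by
  induction l with
  | nil => intro i st rs; cases st <;> simp [runsAux]
  | cons c r ih =>
    intro i st rs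
    by_cases hc : (c == "X") = true
    · cases st <;> simp only [runsAux, hc, if_pos] <;> rw [ih, ih (i+1) _ []] <;> simp
    · cases st with
      | none => simp only [runsAux, hc, Bool.false_eq_true, reduceIte]; rw [ih, ih (i+1) none []]
      | some s =>
        simp only [runsAux, hc, Bool.false_eq_true, reduceIte]
        rw [ih (i+1) none (rs ++ [(s, i - s)]), ih (i+1) none ([] ++ [(s, i - s)])]
        simp

theorem runsAux_some (l : List String) : ∀ (i s : Nat),
    runsAux l i (some s) [] = (s, i + xrun l - s) :: runsAux (l.drop (xrun l)) (i + xrun l) none [] := by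
  induction l with
  | nil => intro i s; simp [runsAux, xrun]
  | cons c r ih =>
    intro i s
    by_cases hc : (c == "X") = true
    · have hx : xrun (c :: r) = xrun r + 1 := by simp [xrun, hc]
      simp only [runsAux, hc, if_pos, hx]
      rw [ih]
      have e1 : i + 1 + xrun r = i + (xrun r + 1) := by omega
      rw [List.drop_succ_cons, e1]
    · have hx : xrun (c :: r) = 0 := by simp [xrun, hc]
      simp only [runsAux, hc, Bool.false_eq_true, reduceIte, hx]
      rw [runsAux_acc, List.drop_zero, Nat.add_zero]
      simp only [runsAux, hc, Bool.false_eq_true, reduceIte]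
      simp

theorem runsAux_X (r : List String) (i : Nat) :
    runsAux ("X" :: r) i none [] = (i, xrun r + 1) :: runsAux (r.drop (xrun r)) (i + (xrun r + 1)) none [] := by
  have h0 : runsAux ("X" :: r) i none [] = runsAux r (i+1) (some i) [] := by simp [runsAux]
  rw [h0, runsAux_some]
  have e1 : i + 1 + xrun r - i = xrun r + 1 := by omega
  have e2 : i + 1 + xrun r = i + (xrun r + 1) := by omega
  rw [e1, e2]

theorem markRun_length (f : Nat) : ∀ (b : List String) (j stop : Nat), (markRun f b j stop).length = b.length := by
  induction f with
  | zero => intro b j stop; rfl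
  | succ f ih =>
    intro b j stop
    simp only [markRun]
    split
    · rw [ih]; simp
    · rfl

theorem markRun_stop (f : Nat) (b : List String) (j stop : Nat) (h : ¬ j < stop) :
    markRun f b j stop = b := by
  cases f <;> simp [markRun, h]

theorem markRunC_unfold (b : List String) (j stop : Nat) (h : j < stop) :
    markRunC b j stop = markRunC (b.set j "O") (j+1) stop := by
  unfold markRunC
  rw [show stop - j = (stop - (j+1)) + 1 from by omega]
  simp only [markRun, if_pos h]

theorem markRun_drop (f : Nat) : ∀ (b : List String) (j stop : Nat), (markRun f b j stop).drop stop = b.drop stop := by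
  induction f with
  | zero => intro b j stop; rfl
  | succ f ih =>
    intro b j stop
    simp only [markRun]
    split
    · next h => rw [ih, List.drop_set_of_lt (by omega)]
    · rfl

theorem markRunC_drop (b : List String) (j stop : Nat) : (markRunC b j stop).drop stop = b.drop stop :=
  markRun_drop (stop - j) b j stop

theorem markRun_getElem!_lt (f : Nat) : ∀ (b : List String) (j stop m : Nat), m < j →
    (markRun f b j stop)[m]! = b[m]! := by
  induction f with
  | zero => intro b j stop m _; rfl
  | succ f ih =>
    intro b j stop m h
    simp only [markRun]
    split
    · rw [ih _ _ _ _ (by omega), set_getElem!_ne _ _ _ _ (by omega)]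
    · rfl

theorem markRun_getElem!_O (f : Nat) : ∀ (b : List String) (j stop m : Nat), stop - j ≤ f →
    j ≤ m → m < stop → m < b.length → (markRun f b j stop)[m]! = "O" := by
  induction f with
  | zero => intro b j stop m hf h1 h2 _; omega
  | succ f ih =>
    intro b j stop m hf h1 h2 h3
    simp only [markRun, if_pos (by omega : j < stop)]
    by_cases hm : j = m
    · subst hm
      rw [markRun_getElem!_lt f _ _ _ _ (by omega)]
      exact set_getElem!_self b j "O" h3
    · exact ih _ _ _ _ (by omega) (by omega) h2 (by simpa using h3)

theorem markRunC_getElem!_O (b : List String) (j stop m : Nat)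
    (h1 : j ≤ m) (h2 : m < stop) (h3 : m < b.length) : (markRunC b j stop)[m]! = "O" :=
  markRun_getElem!_O (stop - j) b j stop m (by omega) h1 h2 h3

theorem markRunC_length (b : List String) (j stop : Nat) : (markRunC b j stop).length = b.length :=
  markRun_length (stop - j) b j stop

theorem xrun_drop_zero (b : List String) (i : Nat) (h : ¬ (i < b.length ∧ b[i]! = "X")) :
    xrun (b.drop i) = 0 := by
  by_cases hi : i < b.length
  · have hne : b[i]! ≠ "X" := fun hx => h ⟨hi, hx⟩
    rw [List.drop_eq_getElem_cons hi]
    have hne' : b[i] ≠ "X" := by rwa [← getElem!_pos b i hi]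
    simp [xrun, hne']
  · rw [List.drop_eq_nil_of_le (by omega)]; rfl

theorem xrun_drop_X (b : List String) (i : Nat) (hi : i < b.length) (hx : b[i]! = "X") :
    b.drop i = "X" :: b.drop (i+1) := by
  rw [List.drop_eq_getElem_cons hi, ← getElem!_pos b i hi, hx]

theorem markFrom_length (f : Nat) : ∀ (b : List String) (i : Nat), (markFrom f b i).length = b.length := by
  induction f with
  | zero => intro b i; rfl
  | succ f ih =>
    intro b i
    simp only [markFrom]
    split
    · rw [ih]; simp
    · rfl

theorem markFrom_eq_gen (f : Nat) : ∀ (b : List String) (i : Nat), b.length - i ≤ f →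
    markFrom f b i = markRunC b i (i + xrun (b.drop i)) := by
  induction f with
  | zero =>
    intro b i hf
    have h0 : xrun (b.drop i) = 0 := xrun_drop_zero b i (by omega)
    rw [h0]
    unfold markRunC
    rw [markRun_stop _ _ _ _ (by omega)]
    rfl
  | succ f ih =>
    intro b i hf
    by_cases hlt : i < b.length
    · by_cases hX : b[i]! = "X"
      · have hg : (decide (i < b.length) && (b[i]! == "X")) = true := by
          simp [hlt]
          rw [← getElem!_pos b i hlt]
          exact hX
        simp only [markFrom]
        rw [if_pos hg]
        have hdrop2 : (b.set i "O").drop (i+1) = b.drop (i+1) := List.drop_set_of_lt (by omega)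
        have hxr : xrun (b.drop i) = xrun (b.drop (i+1)) + 1 := by
          rw [xrun_drop_X b i hlt hX]; simp [xrun]
        rw [ih (b.set i "O") (i+1) (by simp; omega), hdrop2]
        rw [markRunC_unfold b i _ (by omega)]
        congr 1
        omega
      · have hg : ¬ (decide (i < b.length) && (b[i]! == "X")) = true := by
          intro hgt
          rw [Bool.and_eq_true] at hgt
          exact hX (by simpa using hgt.2)
        simp only [markFrom]
        rw [if_neg hg]
        have h0 : xrun (b.drop i) = 0 := xrun_drop_zero b i (fun hcon => hX hcon.2)
        rw [h0]
        unfold markRunC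
        rw [markRun_stop _ _ _ _ (by omega)]
    · have hg : ¬ (decide (i < b.length) && (b[i]! == "X")) = true := by
        intro hgt
        rw [Bool.and_eq_true] at hgt
        exact hlt (by simpa using hgt.1)
      simp only [markFrom]
      rw [if_neg hg]
      have h0 : xrun (b.drop i) = 0 := xrun_drop_zero b i (fun hcon => hlt hcon.1)
      rw [h0]
      unfold markRunC
      rw [markRun_stop _ _ _ _ (by omega)]

theorem markFromC_eq (b : List String) (i : Nat) :
    markFromC b i = markRunC b i (i + xrun (b.drop i)) :=
  markFrom_eq_gen (b.length - i) b i (by omega)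

-- one-step unfolding lemmas for A's scanning loop
theorem rowLoopA_stopF (f : Nat) (b : List String) (idx size : Nat) (c : Int) (t : Bool)
    (h : ¬ idx < b.length) : rowLoopA f b idx size c t = (b, c) := by
  cases f <;> simp [rowLoopA, h]

theorem rowLoopAC_stop (b : List String) (idx size : Nat) (c : Int) (t : Bool)
    (h : ¬ idx < b.length) : rowLoopAC b idx size c t = (b, c) :=
  rowLoopA_stopF _ b idx size c t h

theorem rowLoopAC_skipcell (b : List String) (idx size : Nat) (c : Int) (t : Bool)
    (hidx : idx < b.length) (hX : b[idx]! ≠ "X") :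
    rowLoopAC b idx size c t = rowLoopAC b (idx+1) 0 c t := by
  unfold rowLoopAC
  rw [show b.length - idx = (b.length - (idx+1)) + 1 from by omega]
  simp only [rowLoopA]
  rw [if_pos hidx, if_neg (by simpa using hX)]

theorem rowLoopAC_first (b : List String) (idx size : Nat) (c : Int) (t : Bool)
    (hidx : idx < b.length) (hX : b[idx]! = "X") (hcond : (decide (size + 1 > 1) || t) = false) :
    rowLoopAC b idx size c t = rowLoopAC b (idx+1) (size+1) c t := by
  unfold rowLoopAC
  rw [show b.length - idx = (b.length - (idx+1)) + 1 from by omega]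
  simp only [rowLoopA]
  rw [if_pos hidx, if_pos (by simpa using hX), if_neg (by rw [hcond]; exact Bool.false_ne_true)]

theorem rowLoopAC_mark (b : List String) (idx size : Nat) (c : Int) (t : Bool)
    (hidx : idx < b.length) (hX : b[idx]! = "X") (hcond : (decide (size + 1 > 1) || t) = true) :
    rowLoopAC b idx size c t
      = rowLoopAC (markFromC (if !t then b.set (idx-1) "O" else b) idx) (idx+1) 0 (c+1) t := by
  unfold rowLoopAC
  rw [show b.length - idx = (b.length - (idx+1)) + 1 from by omega]
  simp only [rowLoopA]
  rw [if_pos hidx, if_pos (by simpa using hX), if_pos hcond]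
  unfold markFromC
  rw [markFrom_length]
  have hlen1 : (if !t then b.set (idx-1) "O" else b).length = b.length := by
    split <;> simp
  rw [hlen1]

theorem rowLoopAC_skip (d : Nat) : ∀ (b : List String) (j : Nat) (c : Int) (t : Bool),
    (∀ m, j ≤ m → m < j + d → b[m]! ≠ "X") → rowLoopAC b j 0 c t = rowLoopAC b (j + d) 0 c t := by
  induction d with
  | zero => intro b j c t _; rfl
  | succ d ih =>
    intro b j c t hm
    by_cases hj : j < b.length
    · rw [rowLoopAC_skipcell b j 0 c t hj (hm j (by omega) (by omega))]
      rw [ih b (j+1) c t (fun m h1 h2 => hm m (by omega) (by omega))]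
      congr 1
      omega
    · rw [rowLoopAC_stop b j 0 c t hj, rowLoopAC_stop b (j + (d+1)) 0 c t (by omega)]

-- the common tail after a run [idx, idx+L) has been fully overwritten with "O":
-- scan past the remaining "O" cells and continue on the rest of the row
theorem row_eq_run (n : Nat)
    (ih : ∀ (b : List String) (idx : Nat) (c : Int) (t : Bool), b.length - idx ≤ n →
      rowLoopAC b idx 0 c t = (runsAux (b.drop idx) idx none []).foldl (stepB t) (b, c))
    (b : List String) (idx L j : Nat) (c : Int) (t : Bool)
    (hidx : idx < b.length) (hL : 1 ≤ L) (hLlen : idx + L ≤ b.length)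
    (hfuel : b.length - (idx + 1) ≤ n) (hj1 : idx + 1 ≤ j) (hj2 : j ≤ idx + L) :
    rowLoopAC (markRunC b idx (idx + L)) j 0 (c+1) t
      = (runsAux (b.drop (idx + L)) (idx + L) none []).foldl (stepB t) (markRunC b idx (idx + L), c+1) := by
  have hskip : rowLoopAC (markRunC b idx (idx + L)) j 0 (c+1) t
      = rowLoopAC (markRunC b idx (idx + L)) (idx + L) 0 (c+1) t := by
    rw [rowLoopAC_skip (idx + L - j) (markRunC b idx (idx + L)) j (c+1) t (by
      intro m h1 h2
      rw [markRunC_getElem!_O b idx (idx + L) m (by omega) (by omega) (by omega)]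
      decide)]
    congr 1
    omega
  rw [hskip, ih (markRunC b idx (idx + L)) (idx + L) (c+1) t (by rw [markRunC_length]; omega)]
  rw [markRunC_drop]

theorem row_eq (n : Nat) : ∀ (b : List String) (idx : Nat) (c : Int) (t : Bool), b.length - idx ≤ n →
    rowLoopAC b idx 0 c t = (runsAux (b.drop idx) idx none []).foldl (stepB t) (b, c) := by
  induction n with
  | zero =>
    intro b idx c t hn
    rw [rowLoopAC_stop b idx 0 c t (by omega), List.drop_eq_nil_of_le (by omega)]
    rfl
  | succ n ih =>
    intro b idx c t hn
    by_cases hidx : idx < b.length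
    · by_cases hX : b[idx]! = "X"
      · -- a maximal run of "X" starts at idx
        have hdrop : b.drop idx = "X" :: b.drop (idx+1) := xrun_drop_X b idx hidx hX
        have hL1le : xrun (b.drop (idx+1)) ≤ b.length - (idx+1) := by
          have h := xrun_le (b.drop (idx+1)); simpa using h
        have hxr : xrun (b.drop idx) = xrun (b.drop (idx+1)) + 1 := by
          rw [hdrop]; simp [xrun]
        have hrunsplit : runsAux (b.drop idx) idx none []
            = (idx, xrun (b.drop (idx+1)) + 1)
              :: runsAux (b.drop (idx + (xrun (b.drop (idx+1)) + 1))) (idx + (xrun (b.drop (idx+1)) + 1)) none [] := by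
          rw [hdrop, runsAux_X, List.drop_drop]
          congr 3
          omega
        rw [hrunsplit, List.foldl_cons]
        cases t with
        | true =>
          rw [rowLoopAC_mark b idx 0 c true hidx hX (by simp)]
          simp only [Bool.not_true, Bool.false_eq_true, reduceIte]
          rw [markFromC_eq, hxr]
          rw [row_eq_run n ih b idx (xrun (b.drop (idx+1)) + 1) (idx+1) c true hidx
            (by omega) (by omega) (by omega) (by omega) (by omega)]
          have hstep : stepB true (b, c) (idx, xrun (b.drop (idx+1)) + 1)
              = (markRunC b idx (idx + (xrun (b.drop (idx+1)) + 1)), c + 1) := by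
            simp [stepB, markRunC]
          rw [hstep]
        | false =>
          rw [rowLoopAC_first b idx 0 c false hidx hX (by simp)]
          by_cases hnext : idx + 1 < b.length ∧ b[idx+1]! = "X"
          · -- run of length ≥ 2: the second "X" triggers the marking
            obtain ⟨hi1, hX1⟩ := hnext
            have hL1pos : 1 ≤ xrun (b.drop (idx+1)) := by
              rw [xrun_drop_X b (idx+1) hi1 hX1]; simp [xrun]
            rw [rowLoopAC_mark b (idx+1) 1 c false hi1 hX1 (by simp)]
            simp only [Bool.not_false, if_pos]
            have e0 : idx + 1 - 1 = idx := by omega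
            rw [e0, markFromC_eq]
            rw [show (b.set idx "O").drop (idx+1) = b.drop (idx+1) from List.drop_set_of_lt (by omega)]
            rw [show (idx + 1) + xrun (b.drop (idx+1)) = idx + (xrun (b.drop (idx+1)) + 1) from by omega]
            rw [← markRunC_unfold b idx (idx + (xrun (b.drop (idx+1)) + 1)) (by omega)]
            rw [row_eq_run n ih b idx (xrun (b.drop (idx+1)) + 1) (idx+2) c false hidx
              (by omega) (by omega) (by omega) (by omega) (by omega)]
            have hstep : stepB false (b, c) (idx, xrun (b.drop (idx+1)) + 1)
                = (markRunC b idx (idx + (xrun (b.drop (idx+1)) + 1)), c + 1) := by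
              simp [stepB, markRunC]
              omega
            rw [hstep]
          · -- isolated "X": not a ship in non-transpose mode
            have hL1z : xrun (b.drop (idx+1)) = 0 := xrun_drop_zero b (idx+1) hnext
            have hstep1 : rowLoopAC b (idx+1) 1 c false = rowLoopAC b (idx+1) 0 c false := by
              by_cases hi1 : idx + 1 < b.length
              · have hne : b[idx+1]! ≠ "X" := fun hx => hnext ⟨hi1, hx⟩
                rw [rowLoopAC_skipcell b (idx+1) 1 c false hi1 hne,
                    rowLoopAC_skipcell b (idx+1) 0 c false hi1 hne]
              · rw [rowLoopAC_stop b (idx+1) 1 c false hi1, rowLoopAC_stop b (idx+1) 0 c false hi1]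
            rw [hstep1, ih b (idx+1) c false (by omega)]
            rw [hL1z]
            have hstep : stepB false (b, c) (idx, 0 + 1) = (b, c) := by
              simp [stepB]
            rw [hstep]
      · -- non-"X" cell at idx: the size counter resets, nothing happens
        rw [rowLoopAC_skipcell b idx 0 c t hidx hX]
        rw [ih b (idx+1) c t (by omega)]
        have hdrop : b.drop idx = b[idx] :: b.drop (idx+1) := List.drop_eq_getElem_cons hidx
        have hne : (b[idx] == "X") = false := by
          rw [← getElem!_pos b idx hidx]; simpa using hX
        rw [hdrop]
        simp only [runsAux, hne, Bool.false_eq_true, reduceIte]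
    · rw [rowLoopAC_stop b idx 0 c t hidx, List.drop_eq_nil_of_le (by omega)]
      rfl

theorem fold_eq (t : Bool) (board : List (List String)) : ∀ (acc : List (List String)) (c : Int),
    board.foldl (fun acc b =>
      let res := rowLoopA (b.length - 0) b 0 0 acc.2 t
      (acc.1 ++ [res.1], res.2)) (acc, c)
    = board.foldl (fun acc row =>
      let runs := runsAux row 0 none []
      let rc := runs.foldl (fun (p : List String × Int) run =>
        if t || run.2 ≥ 2 then (markRun run.2 p.1 run.1 (run.1 + run.2), p.2 + 1) else p)
        (row, acc.2)
      (acc.1 ++ [rc.1], rc.2)) (acc, c) := by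
  induction board with
  | nil => intro acc c; rfl
  | cons b rest ih =>
    intro acc c
    simp only [List.foldl_cons]
    have hrow : rowLoopA (b.length - 0) b 0 0 c t = (runsAux b 0 none []).foldl (stepB t) (b, c) := by
      have h := row_eq b.length b 0 c t (by omega)
      unfold rowLoopAC at h
      simpa using h
    show List.foldl _ (acc ++ [(rowLoopA (b.length - 0) b 0 0 c t).1], (rowLoopA (b.length - 0) b 0 0 c t).2) rest = _
    rw [hrow]
    exact ih _ _

-- ===== VERDICT (by name: the statement is the Claim_ definition above) =====
theorem battleship_spec : Claim_equal_battleship := by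
  intro board count t _
  unfold Spec_battleship battleship battleship_alt
  rw [fold_eq]
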